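-- pv_equiv track=rewrite | github.com/HSweazey/Roach-Sweazey_Penneys_Game | src/game_logic.py | play_through_deck
-- ===== SOURCE A (Python) =====
-- from typing import List, Tuple
--
-- def match_pattern(deck: List[int], pattern: List[int]) -> int:
--     """Return the index of the first occurence of pattern in deck, or -1."""
--     m, n = len(pattern), len(deck)
--     for i in range(n - m + 1):
--         if deck[i:i+m] == pattern:
--             return i
--     return -1
--
-- def play_through_deck(deck: List[int], p1_bits: List[int], p2_bits: List[int]) -> Tuple[int,int,int,int,int,int]:
--     """
--     Play through the entire deck until no pattern occurrences remain.
--     Returns: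
--         (p1_cards, p1_tricks, p2_cards, p2_tricks, draw_cards, draw_tricks)
--
--     Scoring:
--     - Winner of each trick gets all cards since the last trick up to their matched pattern.
--     - Draws are computed after the deck is fully scored:
--         * draw_tricks = tricks tied
--         * draw_cards = cards tied
--     """
--     p1_c = p1_t = p2_c = p2_t = 0
--     last_idx = 0
--     n = len(deck)
--     L1, L2 = len(p1_bits), len(p2_bits)
--     i = 0
--
--     while i < n:
--         # Find next occurrences relative to current index
--         idx1_rel = match_pattern(deck[i:], p1_bits)
--         idx2_rel = match_pattern(deck[i:], p2_bits)
--
--         # If both patterns are gone, end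
--         if idx1_rel == -1 and idx2_rel == -1:
--             break
--
--         # Convert relative indices to absolute deck positions
--         idx1 = i + idx1_rel if idx1_rel != -1 else float('inf')
--         idx2 = i + idx2_rel if idx2_rel != -1 else float('inf')
--
--         # Determine winner
--         if idx1 < idx2:  # P1 wins
--             cards_won = idx1 + L1 - last_idx
--             p1_c += cards_won
--             p1_t += 1
--             last_idx = idx1 + L1
--             i = last_idx
--         elif idx2 < idx1:  # P2 wins
--             cards_won = idx2 + L2 - last_idx
--             p2_c += cards_won
--             p2_t += 1
--             last_idx = idx2 + L2
--             i = last_idx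
--         else:  # One pattern missing
--             # Winner by default if the other pattern doesn't exist
--             if idx1 != float('inf'):
--                 cards_won = idx1 + L1 - last_idx
--                 p1_c += cards_won
--                 p1_t += 1
--                 last_idx = idx1 + L1
--                 i = last_idx
--             elif idx2 != float('inf'):
--                 cards_won = idx2 + L2 - last_idx
--                 p2_c += cards_won
--                 p2_t += 1
--                 last_idx = idx2 + L2
--                 i = last_idx
--
--     # --- Compute draws after deck is fully scored ---
--     d_t = d_c = 0
--     if p1_t == p2_t:
--         d_t = p1_t  # tricks tied
--     if p1_c == p2_c:
--         d_c = p1_c  # cards tied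
--
--     return p1_c, p1_t, p2_c, p2_t, d_c, d_t
-- ===== SOURCE B (Python) =====
-- from typing import List, Tuple
--
-- def play_through_deck(deck: List[int], p1_bits: List[int], p2_bits: List[int]) -> Tuple[int,int,int,int,int,int]:
--     """Precompute all occurrence positions of each pattern once, then walk the
--     deck trick by trick with two monotone pointers into those position lists."""
--     n = len(deck)
--
--     def occurrences(pattern):
--         m = len(pattern)
--         return [j for j in range(n - m + 1) if deck[j:j+m] == pattern]
--
--     occ1 = occurrences(p1_bits)
--     occ2 = occurrences(p2_bits)
--     L1, L2 = len(p1_bits), len(p2_bits)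
--
--     p1_c = p1_t = p2_c = p2_t = 0
--     last = 0
--     i = 0
--     k1 = k2 = 0
--     while i < n:
--         while k1 < len(occ1) and occ1[k1] < i:
--             k1 += 1
--         while k2 < len(occ2) and occ2[k2] < i:
--             k2 += 1
--         nxt1 = occ1[k1] if k1 < len(occ1) else None
--         nxt2 = occ2[k2] if k2 < len(occ2) else None
--         if nxt1 is None and nxt2 is None:
--             break
--         if nxt2 is None or (nxt1 is not None and nxt1 <= nxt2):
--             p1_c += nxt1 + L1 - last
--             p1_t += 1
--             last = i = nxt1 + L1
--         else:
--             p2_c += nxt2 + L2 - last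
--             p2_t += 1
--             last = i = nxt2 + L2
--
--     d_t = p1_t if p1_t == p2_t else 0
--     d_c = p1_c if p1_c == p2_c else 0
--     return p1_c, p1_t, p2_c, p2_t, d_c, d_t
-- ===== Notes on version B (the rewrite author's own statement) =====
-- stated objective: alternative
-- what changed: A rescans the remaining deck from scratch for both patterns after every trick (match_pattern on deck[i:] each iteration); B computes each pattern's occurrence positions once and then plays all tricks by advancing two monotone pointers over those lists (intended as faster; a timing run read 1.53x at the largest size but could not confirm it consistently).
import Mathlib
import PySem

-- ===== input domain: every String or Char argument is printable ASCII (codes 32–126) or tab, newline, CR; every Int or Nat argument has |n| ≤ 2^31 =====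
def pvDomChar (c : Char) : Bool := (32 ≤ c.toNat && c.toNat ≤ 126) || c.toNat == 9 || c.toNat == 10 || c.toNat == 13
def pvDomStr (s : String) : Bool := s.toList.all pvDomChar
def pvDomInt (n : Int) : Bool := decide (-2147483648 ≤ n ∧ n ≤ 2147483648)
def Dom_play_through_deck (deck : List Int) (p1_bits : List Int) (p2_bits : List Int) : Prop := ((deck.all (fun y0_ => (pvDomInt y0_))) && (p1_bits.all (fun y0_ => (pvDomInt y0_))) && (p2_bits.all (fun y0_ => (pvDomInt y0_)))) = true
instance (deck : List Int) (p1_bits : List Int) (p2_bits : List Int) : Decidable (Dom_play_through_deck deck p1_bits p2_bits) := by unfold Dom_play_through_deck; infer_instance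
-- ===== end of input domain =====

-- B replaces A's per-trick rescans of the remaining deck (match_pattern on deck[i:] each
-- iteration) by occurrence-position lists computed once and two monotone pointers — a
-- different algorithm with better worst-case scanning. (With an empty pattern both Pythons
-- diverge identically on most decks; the fuelled Lean ports of the two loops still agree on
-- every input, so no Pre_.)


-- ===== PORT A =====
-- 'for i in range(n - m + 1): if deck[i:i+m] == pattern: return i' / 'return -1'
def matchGo (deck pattern : List Int) : List Int → Int
  | [] => -1
  | i :: rest =>
    if PySem.List.slice deck (some i) (some (i + (pattern.length : Int))) = pattern then i
    else matchGo deck pattern rest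

def match_pattern (deck : List Int) (pattern : List Int) : Int :=
  matchGo deck pattern (PySem.List.pyRange 0 ((deck.length : Int) - (pattern.length : Int) + 1) 1)

-- Python's float('inf') sentinel as `none`; 'idx1 < idx2' under that convention
def optLtInf : Option Int → Option Int → Bool
  | some a, some b => a < b
  | some _, none => true
  | none, _ => false

-- A's while loop; state (p1_c, p1_t, p2_c, p2_t, last_idx, i); fuel only makes the
-- recursion total (with nonempty patterns i grows every trick, so fuel n+1 never runs out)
def playLoopA (deck p1_bits p2_bits : List Int) :
    Nat → Int × Int × Int × Int × Int × Int → Int × Int × Int × Int × Int × Int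
  | 0, st => st
  | fuel+1, (p1c, p1t, p2c, p2t, last, i) =>
    if i < (deck.length : Int) then
      let rest := PySem.List.slice deck (some i) none
      let idx1_rel := match_pattern rest p1_bits
      let idx2_rel := match_pattern rest p2_bits
      if idx1_rel = -1 ∧ idx2_rel = -1 then (p1c, p1t, p2c, p2t, last, i)
      else
        let idx1 : Option Int := if idx1_rel ≠ -1 then some (i + idx1_rel) else none
        let idx2 : Option Int := if idx2_rel ≠ -1 then some (i + idx2_rel) else none
        if optLtInf idx1 idx2 then
          let j := i + idx1_rel
          playLoopA deck p1_bits p2_bits fuel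
            (p1c + (j + (p1_bits.length : Int) - last), p1t + 1, p2c, p2t,
             j + (p1_bits.length : Int), j + (p1_bits.length : Int))
        else if optLtInf idx2 idx1 then
          let j := i + idx2_rel
          playLoopA deck p1_bits p2_bits fuel
            (p1c, p1t, p2c + (j + (p2_bits.length : Int) - last), p2t + 1,
             j + (p2_bits.length : Int), j + (p2_bits.length : Int))
        else
          if idx1.isSome then
            let j := i + idx1_rel
            playLoopA deck p1_bits p2_bits fuel
              (p1c + (j + (p1_bits.length : Int) - last), p1t + 1, p2c, p2t,
               j + (p1_bits.length : Int), j + (p1_bits.length : Int))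
          else if idx2.isSome then
            let j := i + idx2_rel
            playLoopA deck p1_bits p2_bits fuel
              (p1c, p1t, p2c + (j + (p2_bits.length : Int) - last), p2t + 1,
               j + (p2_bits.length : Int), j + (p2_bits.length : Int))
          else (p1c, p1t, p2c, p2t, last, i)
    else (p1c, p1t, p2c, p2t, last, i)

def play_through_deck (deck : List Int) (p1_bits : List Int) (p2_bits : List Int) : Int × Int × Int × Int × Int × Int :=
  match playLoopA deck p1_bits p2_bits (deck.length + 1) (0, 0, 0, 0, 0, 0) with
  | (p1c, p1t, p2c, p2t, _, _) =>
    let dt := if p1t = p2t then p1t else 0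
    let dc := if p1c = p2c then p1c else 0
    (p1c, p1t, p2c, p2t, dc, dt)

-- ===== PORT B =====
-- '[j for j in range(n - m + 1) if deck[j:j+m] == pattern]'
def occList (deck pattern : List Int) : List Int :=
  (PySem.List.pyRange 0 ((deck.length : Int) - (pattern.length : Int) + 1) 1).filter
    (fun j => PySem.List.slice deck (some j) (some (j + (pattern.length : Int))) == pattern)

-- B's while loop; the pointer suffixes occ1[k1:], occ2[k2:] are carried as lists, the inner
-- 'while occ[k] < i: k += 1' loops are dropWhile; fuel as in playLoopA
def playLoopB (deck : List Int) (L1 L2 : Int) :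
    Nat → List Int → List Int → Int × Int × Int × Int × Int × Int → Int × Int × Int × Int × Int × Int
  | 0, _, _, st => st
  | fuel+1, rem1, rem2, (p1c, p1t, p2c, p2t, last, i) =>
    if i < (deck.length : Int) then
      let r1 := rem1.dropWhile (fun j => decide (j < i))
      let r2 := rem2.dropWhile (fun j => decide (j < i))
      match r1.head?, r2.head? with
      | none, none => (p1c, p1t, p2c, p2t, last, i)
      | some a, none =>
          playLoopB deck L1 L2 fuel r1 r2
            (p1c + (a + L1 - last), p1t + 1, p2c, p2t, a + L1, a + L1)
      | none, some b =>
          playLoopB deck L1 L2 fuel r1 r2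
            (p1c, p1t, p2c + (b + L2 - last), p2t + 1, b + L2, b + L2)
      | some a, some b =>
          if a ≤ b then
            playLoopB deck L1 L2 fuel r1 r2
              (p1c + (a + L1 - last), p1t + 1, p2c, p2t, a + L1, a + L1)
          else
            playLoopB deck L1 L2 fuel r1 r2
              (p1c, p1t, p2c + (b + L2 - last), p2t + 1, b + L2, b + L2)
    else (p1c, p1t, p2c, p2t, last, i)

def play_through_deck_alt (deck : List Int) (p1_bits : List Int) (p2_bits : List Int) : Int × Int × Int × Int × Int × Int :=
  match playLoopB deck (p1_bits.length : Int) (p2_bits.length : Int) (deck.length + 1)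
      (occList deck p1_bits) (occList deck p2_bits) (0, 0, 0, 0, 0, 0) with
  | (p1c, p1t, p2c, p2t, _, _) =>
    let dt := if p1t = p2t then p1t else 0
    let dc := if p1c = p2c then p1c else 0
    (p1c, p1t, p2c, p2t, dc, dt)

-- ===== PRECONDITION & SPEC =====
def Spec_play_through_deck (deck : List Int) (p1_bits : List Int) (p2_bits : List Int) (out : Int × Int × Int × Int × Int × Int) : Prop := out = play_through_deck_alt deck p1_bits p2_bits
instance (deck : List Int) (p1_bits : List Int) (p2_bits : List Int) (out : Int × Int × Int × Int × Int × Int) : Decidable (Spec_play_through_deck deck p1_bits p2_bits out) := by unfold Spec_play_through_deck; infer_instance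

-- ===== CLAIM (what is proved, stated in full; the proofs are below) =====
def Claim_equal_play_through_deck : Prop := ∀ (deck : List Int) (p1_bits : List Int) (p2_bits : List Int), Dom_play_through_deck deck p1_bits p2_bits → Spec_play_through_deck deck p1_bits p2_bits (play_through_deck deck p1_bits p2_bits)

-- ===== LEMMAS AND PROOFS =====

-- 'pattern occurs in deck at position j'
def patAt (deck pattern : List Int) (j : Nat) : Bool :=
  (deck.drop j).take pattern.length == pattern

-- the first occurrence of `pattern` at position ≥ t, as an Option Int
def nextIdx (deck pattern : List Int) (t : Nat) : Option Int :=
  (((List.range (deck.length + 1 - pattern.length)).filter (patAt deck pattern)).find?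
    (fun j => decide (t ≤ j))).map (Nat.cast : Nat → Int)

theorem pyRange_zero_toNat (x : Int) :
    PySem.List.pyRange 0 x 1 = (List.range x.toNat).map (Nat.cast : Nat → Int) := by
  by_cases h : x ≤ 0
  · rw [Int.toNat_of_nonpos h]
    simp [PySem.List.pyRange]
    omega
  · have : x = (x.toNat : Int) := (Int.toNat_of_nonneg (by omega)).symm
    rw [this, PySem.List.pyRange_zero_natCast]
    have : ((x.toNat : Int)).toNat = x.toNat := by omega
    rw [this]

theorem occList_eq (deck pattern : List Int) :
    occList deck pattern =
      ((List.range (deck.length + 1 - pattern.length)).filter (patAt deck pattern)).map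
        (Nat.cast : Nat → Int) := by
  unfold occList
  rw [pyRange_zero_toNat, List.filter_map]
  have hK : ((deck.length : Int) - (pattern.length : Int) + 1).toNat
      = deck.length + 1 - pattern.length := by omega
  rw [hK]
  refine congrArg (List.map _) (List.filter_congr ?_)
  intro j _
  simp only [Function.comp_apply, PySem.List.slice_natCast_add, patAt]

theorem matchGo_range' (deck pattern : List Int) :
    ∀ (c t r : Nat),
      matchGo (deck.drop t) pattern ((List.range' r c).map (Nat.cast : Nat → Int)) =
        (match (List.range' (t + r) c).find? (patAt deck pattern) with
         | some j => (j : Int) - t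
         | none => -1) := by
  intro c
  induction c with
  | zero => intro t r; rfl
  | succ c ih =>
    intro t r
    rw [List.range'_succ, List.range'_succ, List.map_cons]
    by_cases hP : patAt deck pattern (t + r) = true
    · have hc : PySem.List.slice (deck.drop t) (some (r : Int))
          (some ((r : Int) + (pattern.length : Int))) = pattern := by
        rw [PySem.List.slice_natCast_add, List.drop_drop]
        exact beq_iff_eq.mp (by simpa [patAt] using hP)
      rw [matchGo, if_pos hc, List.find?_cons_of_pos hP]
      push_cast
      ring
    · have hc : ¬ PySem.List.slice (deck.drop t) (some (r : Int))
          (some ((r : Int) + (pattern.length : Int))) = pattern := by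
        rw [PySem.List.slice_natCast_add, List.drop_drop]
        intro hEq
        exact hP (by simpa [patAt] using beq_iff_eq.mpr hEq)
      rw [matchGo, if_neg hc, List.find?_cons_of_neg (by simpa using hP)]
      have := ih t (r + 1)
      rw [show t + r + 1 = t + (r + 1) by omega]
      exact this

theorem find?_filter_ge (P : Nat → Bool) (t : Nat) :
    ∀ (c s : Nat),
      ((List.range' s c).filter P).find? (fun j => decide (t ≤ j)) =
        (List.range' (max s t) (c - (t - s))).find? P := by
  intro c
  induction c with
  | zero => intro s; simp
  | succ c ih =>
    intro s
    rw [List.range'_succ]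
    by_cases hP : P s = true
    · rw [List.filter_cons_of_pos hP]
      by_cases hts : t ≤ s
      · rw [List.find?_cons_of_pos (by simpa using hts),
          show max s t = s by omega, show c + 1 - (t - s) = c + 1 by omega,
          List.range'_succ, List.find?_cons_of_pos hP]
      · rw [List.find?_cons_of_neg (by simpa using hts), ih (s + 1),
          show max (s + 1) t = max s t by omega,
          show c - (t - (s + 1)) = c + 1 - (t - s) by omega]
    · rw [List.filter_cons_of_neg hP, ih (s + 1)]
      by_cases hts : t ≤ s
      · rw [show max (s + 1) t = s + 1 by omega, show c - (t - (s + 1)) = c by omega,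
          show max s t = s by omega, show c + 1 - (t - s) = c + 1 by omega,
          List.range'_succ, List.find?_cons_of_neg hP]
      · rw [show max (s + 1) t = max s t by omega,
          show c - (t - (s + 1)) = c + 1 - (t - s) by omega]

theorem match_pattern_drop (deck pattern : List Int) (t : Nat) (ht : t ≤ deck.length) :
    (if match_pattern (deck.drop t) pattern = -1 then (none : Option Int)
     else some ((t : Int) + match_pattern (deck.drop t) pattern)) = nextIdx deck pattern t := by
  have hmp : match_pattern (deck.drop t) pattern =
      (match (List.range' t (deck.length - t + 1 - pattern.length)).find? (patAt deck pattern) with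
       | some j => (j : Int) - t
       | none => -1) := by
    unfold match_pattern
    rw [pyRange_zero_toNat, List.length_drop,
      show (((deck.length - t : Nat) : Int) - (pattern.length : Int) + 1).toNat
        = deck.length - t + 1 - pattern.length by omega,
      List.range_eq_range', matchGo_range']
    rw [show t + 0 = t by omega]
  have hni : nextIdx deck pattern t =
      ((List.range' t (deck.length - t + 1 - pattern.length)).find? (patAt deck pattern)).map
        (Nat.cast : Nat → Int) := by
    unfold nextIdx
    rw [List.range_eq_range', find?_filter_ge,
      show max 0 t = t by omega,
      show deck.length + 1 - pattern.length - (t - 0) = deck.length - t + 1 - pattern.length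
        by omega]
  rw [hmp, hni]
  cases h : (List.range' t (deck.length - t + 1 - pattern.length)).find? (patAt deck pattern) with
  | none => simp
  | some j =>
    have hj : t ≤ j := (List.mem_range'_1.mp (List.mem_of_find?_eq_some h)).1
    have hne : (j : Int) - (t : Int) ≠ -1 := by omega
    simp only [Option.map_some]
    rw [if_neg hne]
    congr 1
    ring

theorem head_dropWhile_occ (deck pattern : List Int) (t : Nat) :
    ((occList deck pattern).dropWhile (fun j => decide (j < (t : Int)))).head? =
      nextIdx deck pattern t := by
  rw [occList_eq, List.dropWhile_map, List.head?_map, nextIdx,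
    ← List.find?_not_eq_head?_dropWhile]
  congr 1
  congr 1
  funext j
  simp only [Function.comp_apply]
  rcases Nat.lt_or_ge j t with h2 | h2
  · have hj : (j : Int) < (t : Int) := by exact_mod_cast h2
    simp [hj, h2]
  · have hj : ¬ (j : Int) < (t : Int) := by exact_mod_cast Nat.not_lt.mpr h2
    simp [hj, h2]


theorem nextIdx_bounds (deck pattern : List Int) (t : Nat) {a : Int}
    (h : nextIdx deck pattern t = some a) :
    ∃ j : Nat, a = (j : Int) ∧ t ≤ j := by
  unfold nextIdx at h
  rcases Option.map_eq_some_iff.mp h with ⟨j, hj, rfl⟩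
  exact ⟨j, rfl, by simpa using List.find?_some hj⟩

theorem dropWhile_dropWhile {α : Type} (l : List α) (p q : α → Bool)
    (h : ∀ x, q x = true → p x = true) : (l.dropWhile q).dropWhile p = l.dropWhile p := by
  induction l with
  | nil => rfl
  | cons x xs ih =>
    by_cases hq : q x
    · rw [List.dropWhile_cons_of_pos hq, ih, List.dropWhile_cons_of_pos (h x hq)]
    · rw [List.dropWhile_cons_of_neg hq]

theorem loop_eq (deck p1_bits p2_bits : List Int) :
    ∀ (fuel : Nat) (t : Nat) (p1c p1t p2c p2t last : Int) (rem1 rem2 : List Int),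
      rem1.dropWhile (fun j => decide (j < (t : Int))) =
        (occList deck p1_bits).dropWhile (fun j => decide (j < (t : Int))) →
      rem2.dropWhile (fun j => decide (j < (t : Int))) =
        (occList deck p2_bits).dropWhile (fun j => decide (j < (t : Int))) →
      playLoopA deck p1_bits p2_bits fuel (p1c, p1t, p2c, p2t, last, (t : Int)) =
        playLoopB deck (p1_bits.length : Int) (p2_bits.length : Int) fuel rem1 rem2
          (p1c, p1t, p2c, p2t, last, (t : Int)) := by
  intro fuel
  induction fuel with
  | zero => intros; rfl
  | succ fuel ih =>
    intro t p1c p1t p2c p2t last rem1 rem2 h1 h2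
    rw [playLoopA, playLoopB]
    by_cases hlt : (t : Int) < (deck.length : Int)
    · have ht : t ≤ deck.length := by exact_mod_cast hlt.le
      rw [if_pos hlt, if_pos hlt]
      simp only [PySem.List.slice_from_natCast]
      rw [h1, h2, head_dropWhile_occ, head_dropWhile_occ]
      have hA1 := match_pattern_drop deck p1_bits t ht
      have hA2 := match_pattern_drop deck p2_bits t ht
      cases ho1 : nextIdx deck p1_bits t with
      | none =>
        rw [ho1] at hA1
        have hrel1 : match_pattern (deck.drop t) p1_bits = -1 := by
          by_contra hc
          rw [if_neg hc] at hA1; cases hA1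
        cases ho2 : nextIdx deck p2_bits t with
        | none =>
          rw [ho2] at hA2
          have hrel2 : match_pattern (deck.drop t) p2_bits = -1 := by
            by_contra hc
            rw [if_neg hc] at hA2; cases hA2
          simp [hrel1, hrel2]
        | some b =>
          rw [ho2] at hA2
          have hrel2ne : match_pattern (deck.drop t) p2_bits ≠ -1 := by
            intro hc; rw [if_pos hc] at hA2; cases hA2
          rw [if_neg hrel2ne] at hA2
          have hb := Option.some.inj hA2
          obtain ⟨j2, rfl, hj2⟩ := nextIdx_bounds deck p2_bits t ho2
          have hcast : (j2 : Int) + (p2_bits.length : Int) = ((j2 + p2_bits.length : Nat) : Int) := by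
            push_cast; ring
          have hmono1 : ((occList deck p1_bits).dropWhile (fun j => decide (j < (t : Int)))).dropWhile
                (fun j => decide (j < ((j2 + p2_bits.length : Nat) : Int))) =
              (occList deck p1_bits).dropWhile (fun j => decide (j < ((j2 + p2_bits.length : Nat) : Int))) :=
            dropWhile_dropWhile _ _ _ (by intro x hx; simp only [decide_eq_true_eq] at hx ⊢; push_cast at hx ⊢; omega)
          have hmono2 : ((occList deck p2_bits).dropWhile (fun j => decide (j < (t : Int)))).dropWhile
                (fun j => decide (j < ((j2 + p2_bits.length : Nat) : Int))) =
              (occList deck p2_bits).dropWhile (fun j => decide (j < ((j2 + p2_bits.length : Nat) : Int))) :=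
            dropWhile_dropWhile _ _ _ (by intro x hx; simp only [decide_eq_true_eq] at hx ⊢; push_cast at hx ⊢; omega)
          simp only [hrel1, hrel2ne, optLtInf, hb, hcast, ne_eq, not_false_eq_true, if_true,
            and_false, if_false, Option.isSome_some]
          exact ih (j2 + p2_bits.length) _ _ _ _ _ _ _ hmono1 hmono2
      | some a =>
        rw [ho1] at hA1
        have hrel1ne : match_pattern (deck.drop t) p1_bits ≠ -1 := by
          intro hc; rw [if_pos hc] at hA1; cases hA1
        rw [if_neg hrel1ne] at hA1
        have ha := Option.some.inj hA1
        obtain ⟨j1, rfl, hj1⟩ := nextIdx_bounds deck p1_bits t ho1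
        have hcast1 : (j1 : Int) + (p1_bits.length : Int) = ((j1 + p1_bits.length : Nat) : Int) := by
          push_cast; ring
        have hmono11 : ((occList deck p1_bits).dropWhile (fun j => decide (j < (t : Int)))).dropWhile
              (fun j => decide (j < ((j1 + p1_bits.length : Nat) : Int))) =
            (occList deck p1_bits).dropWhile (fun j => decide (j < ((j1 + p1_bits.length : Nat) : Int))) :=
          dropWhile_dropWhile _ _ _ (by intro x hx; simp only [decide_eq_true_eq] at hx ⊢; push_cast at hx ⊢; omega)
        have hmono12 : ((occList deck p2_bits).dropWhile (fun j => decide (j < (t : Int)))).dropWhile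
              (fun j => decide (j < ((j1 + p1_bits.length : Nat) : Int))) =
            (occList deck p2_bits).dropWhile (fun j => decide (j < ((j1 + p1_bits.length : Nat) : Int))) :=
          dropWhile_dropWhile _ _ _ (by intro x hx; simp only [decide_eq_true_eq] at hx ⊢; push_cast at hx ⊢; omega)
        cases ho2 : nextIdx deck p2_bits t with
        | none =>
          rw [ho2] at hA2
          have hrel2 : match_pattern (deck.drop t) p2_bits = -1 := by
            by_contra hc
            rw [if_neg hc] at hA2; cases hA2
          simp only [hrel1ne, hrel2, optLtInf, ha, hcast1, ne_eq, not_false_eq_true, if_true,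
            false_and, if_false, Option.isSome_some]
          exact ih (j1 + p1_bits.length) _ _ _ _ _ _ _ hmono11 hmono12
        | some b =>
          rw [ho2] at hA2
          have hrel2ne : match_pattern (deck.drop t) p2_bits ≠ -1 := by
            intro hc; rw [if_pos hc] at hA2; cases hA2
          rw [if_neg hrel2ne] at hA2
          have hb := Option.some.inj hA2
          obtain ⟨j2, rfl, hj2⟩ := nextIdx_bounds deck p2_bits t ho2
          have hcast2 : (j2 : Int) + (p2_bits.length : Int) = ((j2 + p2_bits.length : Nat) : Int) := by
            push_cast; ring
          have hmono21 : ((occList deck p1_bits).dropWhile (fun j => decide (j < (t : Int)))).dropWhile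
                (fun j => decide (j < ((j2 + p2_bits.length : Nat) : Int))) =
              (occList deck p1_bits).dropWhile (fun j => decide (j < ((j2 + p2_bits.length : Nat) : Int))) :=
            dropWhile_dropWhile _ _ _ (by intro x hx; simp only [decide_eq_true_eq] at hx ⊢; push_cast at hx ⊢; omega)
          have hmono22 : ((occList deck p2_bits).dropWhile (fun j => decide (j < (t : Int)))).dropWhile
                (fun j => decide (j < ((j2 + p2_bits.length : Nat) : Int))) =
              (occList deck p2_bits).dropWhile (fun j => decide (j < ((j2 + p2_bits.length : Nat) : Int))) :=
            dropWhile_dropWhile _ _ _ (by intro x hx; simp only [decide_eq_true_eq] at hx ⊢; push_cast at hx ⊢; omega)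
          rcases lt_trichotomy (j1 : Int) (j2 : Int) with hlt12 | heq12 | hlt21
          · have hle : ((j1 : Int) ≤ (j2 : Int)) := hlt12.le
            simp only [hrel1ne, hrel2ne, optLtInf, ha, hb, hcast1, ne_eq, not_false_eq_true,
              if_true, and_self, if_false, decide_eq_true_eq, hlt12, hle,
              decide_true]
            exact ih (j1 + p1_bits.length) _ _ _ _ _ _ _ hmono11 hmono12
          · have hle : ((j1 : Int) ≤ (j2 : Int)) := le_of_eq heq12
            have hnlt1 : ¬ ((j1 : Int) < (j2 : Int)) := by omega
            have hnlt2 : ¬ ((j2 : Int) < (j1 : Int)) := by omega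
            simp only [hrel1ne, hrel2ne, optLtInf, ha, hb, hcast1, ne_eq, not_false_eq_true,
              if_true, decide_eq_true_eq, Option.isSome_some,
              if_neg hnlt1, if_neg hnlt2, if_pos hle]
            exact ih (j1 + p1_bits.length) _ _ _ _ _ _ _ hmono11 hmono12
          · have hnle : ¬ ((j1 : Int) ≤ (j2 : Int)) := by omega
            have hnlt1 : ¬ ((j1 : Int) < (j2 : Int)) := by omega
            simp only [hrel1ne, hrel2ne, optLtInf, ha, hb, hcast2, ne_eq, not_false_eq_true,
              if_true, decide_eq_true_eq,
              if_neg hnlt1, if_pos hlt21, if_neg hnle]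
            exact ih (j2 + p2_bits.length) _ _ _ _ _ _ _ hmono21 hmono22
    · rw [if_neg hlt, if_neg hlt]

-- ===== VERDICT (by name: the statement is the Claim_ definition above) =====
theorem play_through_deck_spec : Claim_equal_play_through_deck := by
  intro deck p1_bits p2_bits _
  unfold Spec_play_through_deck play_through_deck play_through_deck_alt
  have h := loop_eq deck p1_bits p2_bits (deck.length + 1) 0 0 0 0 0 0
    (occList deck p1_bits) (occList deck p2_bits) rfl rfl
  simp only [Nat.cast_zero] at h
  rw [h]
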